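-- pv_equiv track=rewrite | github.com/iberdiev/coding_for_fun | Rummy card game implementation/question3-final.py | valid_number_of_moves
-- ===== SOURCE A (Python) =====
-- def valid_number_of_moves(play_history, active_player):
--     queue_str = [str(play[0]) for play in play_history]
--     queue_str = ''.join(queue_str) + str(active_player)
--     current = queue_str[0]
--     count_current = 1
--     for i in range(len(queue_str) - 1):
--         if queue_str[i + 1] == current:
--             count_current += 1
--             if count_current == 7:
--                 return False
--         else:
--             count_current = 1
--             current = queue_str[i + 1]
--     return True
-- ===== SOURCE B (Python) =====
-- def valid_number_of_moves(play_history, active_player):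
--     t = ''.join(str(play[0]) for play in play_history) + str(active_player)
--     while len(t) >= 7:
--         if t[:7] == t[0] * 7:
--             return False
--         t = t[1:]
--     return True
-- ===== Notes on version B (the rewrite author's own statement) =====
-- stated objective: alternative
-- what changed: Replaces A's stateful run-counter scan (current char + consecutive count) with a sliding 7-character-window check over suffixes: the move string is invalid iff some window of 7 characters is one character repeated.
import Mathlib
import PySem

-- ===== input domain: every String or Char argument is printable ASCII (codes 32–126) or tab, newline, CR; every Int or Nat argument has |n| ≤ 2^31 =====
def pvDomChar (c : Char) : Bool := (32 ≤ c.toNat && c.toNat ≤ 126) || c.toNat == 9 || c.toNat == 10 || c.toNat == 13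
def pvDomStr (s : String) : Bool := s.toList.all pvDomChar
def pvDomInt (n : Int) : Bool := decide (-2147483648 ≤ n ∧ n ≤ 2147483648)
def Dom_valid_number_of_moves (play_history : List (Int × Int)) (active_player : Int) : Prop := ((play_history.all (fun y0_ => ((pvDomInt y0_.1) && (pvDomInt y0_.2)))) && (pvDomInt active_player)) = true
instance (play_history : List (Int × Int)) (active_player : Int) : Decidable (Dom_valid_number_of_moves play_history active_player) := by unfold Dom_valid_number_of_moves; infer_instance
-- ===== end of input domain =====

-- B replaces A's stateful run-counter scan with a sliding 7-character-window check over
-- suffixes of the same move string (objective: alternative; same linear cost).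

-- ===== PORT A =====
-- ''.join(str(play[0]) for play in play_history) + str(active_player), as a char list
-- (join with empty separator = concatenation of the pieces; identical line in both Pythons).
def pvQueue (play_history : List (Int × Int)) (active_player : Int) : List Char :=
  (play_history.map (fun play => PySem.Int.toChars play.1)).flatten ++ PySem.Int.toChars active_player

-- A's for-loop over queue_str[1:], carrying (current, count_current); early 'return False'
-- becomes the 'false' branch.
def pvLoopA : List Char → Char → Int → Bool
  | [], _, _ => true
  | c :: rest, current, count =>
    if c == current then
      (if count + 1 == 7 then false else pvLoopA rest current (count + 1))
    else pvLoopA rest c 1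

def valid_number_of_moves (play_history : List (Int × Int)) (active_player : Int) : Bool :=
  match pvQueue play_history active_player with
  | [] => true   -- unreachable: str(active_player) is never empty, so queue_str[0] never raises
  | c :: rest => pvLoopA rest c 1

-- ===== PORT B =====
-- Source B's while-loop: while len(t) >= 7: if t[:7] == t[0]*7: return False; t = t[1:].
-- t[:7] is 'take 7', t[0]*7 is 'replicate 7 c', t[1:] is the tail.
def pvLoopB : List Char → Bool
  | [] => true
  | c :: rest =>
    if 7 ≤ rest.length + 1 then
      (if (c :: rest).take 7 == List.replicate 7 c then false else pvLoopB rest)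
    else true

def valid_number_of_moves_alt (play_history : List (Int × Int)) (active_player : Int) : Bool :=
  pvLoopB (pvQueue play_history active_player)

-- ===== PRECONDITION & SPEC =====
def Spec_valid_number_of_moves (play_history : List (Int × Int)) (active_player : Int) (out : Bool) : Prop := out = valid_number_of_moves_alt play_history active_player
instance (play_history : List (Int × Int)) (active_player : Int) (out : Bool) : Decidable (Spec_valid_number_of_moves play_history active_player out) := by unfold Spec_valid_number_of_moves; infer_instance

-- ===== CLAIM (what is proved, stated in full; the proofs are below) =====
def Claim_equal_valid_number_of_moves : Prop := ∀ (play_history : List (Int × Int)) (active_player : Int), Dom_valid_number_of_moves play_history active_player → Spec_valid_number_of_moves play_history active_player (valid_number_of_moves play_history active_player)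

-- ===== LEMMAS AND PROOFS =====

-- A list shorter than 7 has no 7-window: B's loop returns true.
theorem pvLoopB_short (t : List Char) (h : t.length < 7) : pvLoopB t = true := by
  cases t with
  | nil => rfl
  | cons c rest =>
    unfold pvLoopB
    simp at h
    rw [if_neg (by omega)]

-- Skipping a (short) run of 'cur' just before a different char 'c' changes nothing:
-- every window starting inside the run contains both cur and c, so it never fires.
theorem pvLoopB_skip (m : ℕ) (cur c : Char) (r : List Char) (hm : m ≤ 6) (hne : c ≠ cur) :
    pvLoopB (List.replicate m cur ++ c :: r) = pvLoopB (c :: r) := by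
  induction m with
  | zero => rfl
  | succ k ih =>
    have hk : k ≤ 6 := by omega
    rw [List.replicate_succ, List.cons_append]
    unfold pvLoopB
    by_cases hl : 7 ≤ (List.replicate k cur ++ c :: r).length + 1
    · rw [if_pos hl]
      have hwin : ((cur :: (List.replicate k cur ++ c :: r)).take 7 == List.replicate 7 cur) = false := by
        rw [beq_eq_false_iff_ne]
        intro heq
        have h1 : ((cur :: (List.replicate k cur ++ c :: r)).take 7)[k + 1]? = some c := by
          rw [List.getElem?_take_of_lt (by omega)]
          simp [List.length_replicate]
        have h2 : (List.replicate 7 cur)[k + 1]? = some cur := by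
          rw [List.getElem?_replicate]
          simp [Nat.lt_of_lt_of_le (by omega : k + 1 < 7) (le_refl 7)]
        rw [heq, h2] at h1
        exact hne (Option.some.injEq _ _ ▸ h1).symm
      rw [hwin]
      simp only [Bool.false_eq_true, if_false]
      exact ih hk
    · rw [if_neg hl]
      have : (c :: r).length < 7 := by
        simp [List.length_append, List.length_replicate] at hl ⊢
        omega
      exact (pvLoopB_short _ this).symm

-- Main invariant: A's state (cur, cnt) with 1 ≤ cnt ≤ 6 over the remaining list r computes
-- exactly B's window scan over the virtual string (cur repeated cnt times) ++ r.
theorem pvLoop_main (r : List Char) : ∀ (cur : Char) (cnt : ℕ), 1 ≤ cnt → cnt ≤ 6 →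
    pvLoopA r cur (cnt : Int) = pvLoopB (List.replicate cnt cur ++ r) := by
  induction r with
  | nil =>
    intro cur cnt h1 h6
    simp only [pvLoopA, List.append_nil]
    exact (pvLoopB_short _ (by simp [List.length_replicate]; omega)).symm
  | cons c r' ih =>
    intro cur cnt h1 h6
    by_cases hc : c = cur
    · subst hc
      by_cases h66 : cnt = 6
      · subst h66
        have hA : pvLoopA (c :: r') c (((6 : ℕ)) : Int) = false := by
          norm_num [pvLoopA]
        rw [hA]
        have hlist : List.replicate 6 c ++ c :: r' = List.replicate 7 c ++ r' := by
          rw [show (7 : ℕ) = 6 + 1 from rfl, List.replicate_succ']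
          simp
        rw [hlist]
        have : pvLoopB (List.replicate 7 c ++ r') = false := by
          rw [show List.replicate 7 c ++ r' = c :: (List.replicate 6 c ++ r') by
            rw [show (7 : ℕ) = 1 + 6 from rfl, List.replicate_add]; simp]
          unfold pvLoopB
          rw [if_pos (by simp)]
          have : ((c :: (List.replicate 6 c ++ r')).take 7 == List.replicate 7 c) = true := by
            rw [beq_iff_eq]
            rw [show (7 : ℕ) = 6 + 1 from rfl, List.take_succ_cons, List.take_left' (by simp)]
            rfl
          rw [this]
          simp
        rw [this]
      · -- cnt ≤ 5: counter increments, run extends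
        have hA : pvLoopA (c :: r') c (cnt : Int) = pvLoopA r' c ((cnt : Int) + 1) := by
          simp only [pvLoopA, beq_self_eq_true, if_true]
          rw [if_neg]
          simp only [beq_iff_eq]
          omega
        have hcast : (cnt : Int) + 1 = ((cnt + 1 : ℕ) : Int) := by push_cast; ring
        rw [hA, hcast, ih c (cnt + 1) (by omega) (by omega)]
        congr 1
        rw [List.replicate_succ']
        simp
    · -- run broken: A restarts with (c, 1); B skips the dead windows
      have hA : pvLoopA (c :: r') cur (cnt : Int) = pvLoopA r' c 1 := by
        simp [pvLoopA, hc]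
      rw [hA, show (1 : Int) = ((1 : ℕ) : Int) from rfl, ih c 1 (le_refl 1) (by omega)]
      rw [pvLoopB_skip cnt cur c r' h6 hc]
      rfl

-- ===== VERDICT (by name: the statement is the Claim_ definition above) =====
theorem valid_number_of_moves_spec : Claim_equal_valid_number_of_moves := by
  intro play_history active_player _
  unfold Spec_valid_number_of_moves valid_number_of_moves valid_number_of_moves_alt
  cases hq : pvQueue play_history active_player with
  | nil => rfl
  | cons c rest =>
    show pvLoopA rest c 1 = pvLoopB (c :: rest)
    rw [show (1 : Int) = ((1 : ℕ) : Int) from rfl, pvLoop_main rest c 1 (le_refl 1) (by omega)]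
    rfl
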